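-- pv_equiv track=rewrite | github.com/InAnYan/jabref | scripts/generate_agents_md.py | adjust_header_levels
-- ===== SOURCE A (Python) =====
-- def adjust_header_levels(content):
--     lines = content.split("\n")
--     new_lines = []
--     for line in lines:
--         if line.startswith("#"):
--             new_lines.append("#" + line)
--         else:
--             new_lines.append(line)
--     return "\n".join(new_lines)
-- ===== SOURCE B (Python) =====
-- def adjust_header_levels(content):
--     # single left-to-right character scan: duplicate a hash character seen at a line start
--     out = []
--     at_line_start = True
--     for ch in content:
--         if at_line_start and ch == "#":
--             out.append("#")
--         out.append(ch)
--         at_line_start = ch == "\n"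
--     return "".join(out)
-- ===== Notes on version B (the rewrite author's own statement) =====
-- stated objective: alternative
-- what changed: Replaces split-into-lines / per-line rebuild / join with a single character scan that tracks line starts in a boolean and emits an extra hash character in place.
import Mathlib
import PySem

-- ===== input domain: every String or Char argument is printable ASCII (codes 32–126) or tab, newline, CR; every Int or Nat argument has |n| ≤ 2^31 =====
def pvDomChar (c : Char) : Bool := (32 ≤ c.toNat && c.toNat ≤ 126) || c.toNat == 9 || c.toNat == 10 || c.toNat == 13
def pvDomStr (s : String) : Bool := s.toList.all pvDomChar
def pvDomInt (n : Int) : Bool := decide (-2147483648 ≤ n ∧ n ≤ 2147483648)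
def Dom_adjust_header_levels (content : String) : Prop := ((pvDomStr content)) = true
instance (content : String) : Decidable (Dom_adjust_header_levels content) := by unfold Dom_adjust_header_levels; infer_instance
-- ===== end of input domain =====

-- B replaces A's split/per-line/join pipeline by a single character scan that tracks
-- line starts in a boolean; an alternative decomposition, same asymptotic cost.


-- ===== PORT A =====
-- lines = content.split("\n"); new_lines built by the foldl (append per line); "\n".join(new_lines)
def adjust_header_levels (content : String) : String :=
  String.ofList (PySem.Chars.join ['\n']
    ((PySem.Chars.splitOn content.toList ['\n']).foldl (fun acc line =>
      acc ++ [if PySem.Chars.startswith line ['#'] then ['#'] ++ line else line]) []))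

-- ===== PORT B =====
-- the for-loop over characters: at_line_start is the Bool state
def pvScan : List Char → Bool → List Char
  | [], _ => []
  | c :: cs, atStart =>
      (if atStart && c == '#' then ['#', c] else [c]) ++ pvScan cs (c == '\n')

def adjust_header_levels_alt (content : String) : String :=
  String.ofList (pvScan content.toList true)

-- ===== PRECONDITION & SPEC =====
def Spec_adjust_header_levels (content : String) (out : String) : Prop := out = adjust_header_levels_alt content
instance (content : String) (out : String) : Decidable (Spec_adjust_header_levels content out) := by unfold Spec_adjust_header_levels; infer_instance

-- ===== CLAIM (what is proved, stated in full; the proofs are below) =====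
def Claim_equal_adjust_header_levels : Prop := ∀ (content : String), Dom_adjust_header_levels content → Spec_adjust_header_levels content (adjust_header_levels content)

-- ===== LEMMAS AND PROOFS =====

-- structural single-separator split: (current line, remaining lines)
def pvSplit : List Char → List Char × List (List Char)
  | [] => ([], [])
  | c :: cs =>
      let r := pvSplit cs
      if c = '\n' then ([], r.1 :: r.2) else (c :: r.1, r.2)

def pvF (line : List Char) : List Char :=
  if PySem.Chars.startswith line ['#'] then ['#'] ++ line else line

lemma pvSplitOn_go_eq (s : List Char) : ∀ (fuel : Nat) (cur : List Char) (acc : List (List Char)),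
    s.length ≤ fuel →
    PySem.Chars.splitOn.go ['\n'] fuel s cur acc
      = acc.reverse ++ (cur.reverse ++ (pvSplit s).1) :: (pvSplit s).2 := by
  induction s with
  | nil =>
      intro fuel cur acc _
      cases fuel <;> simp [PySem.Chars.splitOn.go, pvSplit]
  | cons c cs ih =>
      intro fuel cur acc hfuel
      cases fuel with
      | zero => simp at hfuel
      | succ f =>
        by_cases hc : c = '\n'
        · subst hc
          rw [show PySem.Chars.splitOn.go ['\n'] (f+1) ('\n' :: cs) cur acc
              = PySem.Chars.splitOn.go ['\n'] f cs [] (cur.reverse :: acc) by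
                simp [PySem.Chars.splitOn.go, List.isPrefixOf]]
          rw [ih f [] (cur.reverse :: acc) (by simpa using Nat.lt_succ_iff.mp (by simpa using hfuel))]
          simp [pvSplit]
        · rw [show PySem.Chars.splitOn.go ['\n'] (f+1) (c :: cs) cur acc
              = PySem.Chars.splitOn.go ['\n'] f cs (c :: cur) acc by
                simp [PySem.Chars.splitOn.go, List.isPrefixOf]
                intro h
                exact absurd h.symm hc]
          rw [ih f (c :: cur) acc (by simpa using Nat.lt_succ_iff.mp (by simpa using hfuel))]
          simp [pvSplit, hc]

lemma pvSplitOn_eq (s : List Char) :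
    PySem.Chars.splitOn s ['\n'] = (pvSplit s).1 :: (pvSplit s).2 := by
  unfold PySem.Chars.splitOn
  rw [pvSplitOn_go_eq s (s.length + 1) [] [] (by omega)]
  simp

lemma pvJoin_cons_append (a l : List Char) (ls : List (List Char)) :
    PySem.Chars.join ['\n'] ((a ++ l) :: ls) = a ++ PySem.Chars.join ['\n'] (l :: ls) := by
  cases ls with
  | nil => simp [PySem.Chars.join, List.intercalate]
  | cons m ms => simp [PySem.Chars.join, List.intercalate]

lemma pvJoin_cons (l m : List Char) (ms : List (List Char)) :
    PySem.Chars.join ['\n'] (l :: m :: ms) = l ++ '\n' :: PySem.Chars.join ['\n'] (m :: ms) := by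
  simp [PySem.Chars.join, List.intercalate]

lemma pvScan_eq (s : List Char) : ∀ (b : Bool),
    pvScan s b = PySem.Chars.join ['\n']
      ((if b then pvF (pvSplit s).1 else (pvSplit s).1) :: (pvSplit s).2.map pvF) := by
  induction s with
  | nil =>
      intro b
      cases b <;> simp [pvScan, pvSplit, pvF, PySem.Chars.startswith, PySem.Chars.join,
        List.intercalate]
  | cons c cs ih =>
      intro b
      by_cases hc : c = '\n'
      · subst hc
        have hsplit : pvSplit ('\n' :: cs) = ([], (pvSplit cs).1 :: (pvSplit cs).2) := by
          simp [pvSplit]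
        rw [hsplit]
        have hb : (if b then pvF [] else ([] : List Char)) = [] := by
          cases b <;> simp [pvF, PySem.Chars.startswith, List.isPrefixOf]
        simp only [List.map_cons]
        rw [hb, pvJoin_cons]
        have h1 : pvScan ('\n' :: cs) b = '\n' :: pvScan cs true := by
          simp [pvScan]
        rw [h1, ih true]
        simp
      · have hcb : (c == '\n') = false := by simp [hc]
        have hsplit : pvSplit (c :: cs) = (c :: (pvSplit cs).1, (pvSplit cs).2) := by
          simp [pvSplit, hc]
        rw [hsplit]
        have h1 : pvScan (c :: cs) b
            = (if b && c == '#' then ['#', c] else [c]) ++ pvScan cs false := by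
          simp [pvScan, hcb]
        rw [h1, ih false]
        have hsw : PySem.Chars.startswith (c :: (pvSplit cs).1) ['#'] = ('#' == c) := by
          simp [PySem.Chars.startswith, List.isPrefixOf]
        have heq : (if b then pvF (c :: (pvSplit cs).1) else c :: (pvSplit cs).1)
            = (if b && c == '#' then ['#', c] else [c]) ++ (pvSplit cs).1 := by
          cases b
          · simp
          · by_cases hh : c = '#'
            · subst hh; simp [pvF, hsw]
            · have h2 : ('#' == c) = false := by simp [Ne.symm hh]
              have h3 : (c == '#') = false := by simp [hh]
              simp [pvF, hsw, h2, h3]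
        rw [heq, pvJoin_cons_append]
        simp

-- ===== VERDICT (by name: the statement is the Claim_ definition above) =====
theorem adjust_header_levels_spec : Claim_equal_adjust_header_levels := by
  intro content _
  show adjust_header_levels content = adjust_header_levels_alt content
  unfold adjust_header_levels adjust_header_levels_alt
  rw [PySem.List.foldl_append_singleton_eq_map, pvSplitOn_eq, pvScan_eq]
  have hfun : (fun line => if PySem.Chars.startswith line ['#'] = true then ['#'] ++ line else line) = pvF := by
    funext l; simp [pvF]
  rw [hfun]
  simp
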